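-- pv_equiv track=rewrite | github.com/2018007956/Algorithm | programmers/고득점 Kit/스택큐/42586.py | solution
-- ===== SOURCE A (Python) =====
-- import math
--
-- def solution(progresses, speeds):
--     times = []
--     for x, spe in zip(progresses, speeds):
--         times.append(math.ceil((100-x)/spe))
--
--     answer = []
--     idx = 0
--     while idx < len(times):
--         cur = times[idx]
--         cnt = 1
--         for i in range(idx+1, len(times)):
--             if times[i] <= cur:
--                 cnt += 1
--             else:
--                 break
--         answer.append(cnt)
--         idx += cnt
--     return answer
-- ===== SOURCE B (Python) =====
-- import math
--
-- def solution(progresses, speeds):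
--     times = [math.ceil((100 - p) / s) for p, s in zip(progresses, speeds)]
--     maxes = []
--     for t in times:
--         maxes.append(t if not maxes or t > maxes[-1] else maxes[-1])
--     counts = {}
--     for m in maxes:
--         counts[m] = counts.get(m, 0) + 1
--     return list(counts.values())
-- ===== Notes on version B (the rewrite author's own statement) =====
-- stated objective: alternative
-- what changed: B drops A's group-leader scan with index jumping entirely: it computes the running prefix maximum of the deploy times and returns the multiplicities of its distinct values via an insertion-ordered counting dict — group leaders are exactly the strict prefix-maximum records, so the count of each distinct prefix-max value is one group size.
import Mathlib
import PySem

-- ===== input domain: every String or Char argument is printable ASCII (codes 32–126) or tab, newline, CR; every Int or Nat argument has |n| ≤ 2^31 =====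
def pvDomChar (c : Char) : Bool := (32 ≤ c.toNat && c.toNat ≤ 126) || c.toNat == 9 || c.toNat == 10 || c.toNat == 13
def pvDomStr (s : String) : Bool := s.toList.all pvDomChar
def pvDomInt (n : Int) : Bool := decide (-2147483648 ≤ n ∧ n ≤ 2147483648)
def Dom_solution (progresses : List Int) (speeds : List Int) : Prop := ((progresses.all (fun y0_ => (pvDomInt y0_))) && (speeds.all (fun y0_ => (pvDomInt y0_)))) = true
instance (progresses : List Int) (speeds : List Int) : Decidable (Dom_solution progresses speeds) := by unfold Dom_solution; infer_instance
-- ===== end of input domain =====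

-- B replaces A's leader scan with index jumping by a prefix-maximum pass plus an
-- insertion-ordered counting dict over the prefix-max values (objective: alternative).

-- ===== PORT A =====
-- math.ceil((100-x)/spe) = -((-(100-x)) // spe); exact on Dom's |n| ≤ 2^31 range
-- (float quotient error < 2^-21 cannot cross an integer for numerators < 2^53).
def pvCeil (a b : Int) : Int := -(PySem.Int.floordiv (-a) b)

-- the inner 'for i in range(idx+1, len(times)): if times[i] <= cur: cnt += 1 else: break'
def aInner (ts : List Int) (cur : Int) : Nat :=
  match ts with
  | [] => 0
  | t :: rest => if t ≤ cur then 1 + aInner rest cur else 0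

-- the 'while idx < len(times)' loop
def aLoop (times : List Int) (idx : Nat) (answer : List Int) : List Int :=
  if h : idx < times.length then
    let cur := times[idx]
    let cnt := 1 + aInner (times.drop (idx + 1)) cur
    aLoop times (idx + cnt) (answer ++ [(cnt : Int)])
  else answer
termination_by times.length - idx
decreasing_by omega

def solution (progresses : List Int) (speeds : List Int) : List Int :=
  let times := (progresses.zip speeds).map (fun xs => pvCeil (100 - xs.1) xs.2)
  aLoop times 0 []

-- ===== PORT B =====
-- 'for t in times: maxes.append(t if not maxes or t > maxes[-1] else maxes[-1])'
-- (maxes[-1] only evaluated when maxes is nonempty, hence the getLast? match)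
def bMaxes (acc : List Int) (ts : List Int) : List Int :=
  match ts with
  | [] => acc
  | t :: rest =>
    bMaxes (acc ++ [match acc.getLast? with
                    | none => t
                    | some m => if m < t then t else m]) rest

def solution_alt (progresses : List Int) (speeds : List Int) : List Int :=
  let times := (progresses.zip speeds).map (fun xs => pvCeil (100 - xs.1) xs.2)
  let maxes := bMaxes [] times
  -- 'counts = {}; for m in maxes: counts[m] = counts.get(m, 0) + 1; return list(counts.values())'
  (maxes.foldl (fun d m => d.insert m (d.getD m 0 + 1)) PySem.Dict.empty).values

-- ===== PRECONDITION & SPEC =====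
-- A raises ZeroDivisionError when a speed paired with a progress entry is 0;
-- exactly those inputs are excluded.
def Pre_solution (progresses : List Int) (speeds : List Int) : Prop :=
  (0 : Int) ∉ speeds.take progresses.length
instance (progresses : List Int) (speeds : List Int) : Decidable (Pre_solution progresses speeds) := by unfold Pre_solution; infer_instance
def pvWitness_solution : List Int × List Int := ([93, 30, 55], [1, 30, 5])

def Spec_solution (progresses : List Int) (speeds : List Int) (out : List Int) : Prop := out = solution_alt progresses speeds
instance (progresses : List Int) (speeds : List Int) (out : List Int) : Decidable (Spec_solution progresses speeds out) := by unfold Spec_solution; infer_instance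

-- ===== CLAIM (what is proved, stated in full; the proofs are below) =====
def Claim_equal_solution : Prop := ∀ (progresses : List Int) (speeds : List Int), Dom_solution progresses speeds → Pre_solution progresses speeds → Spec_solution progresses speeds (solution progresses speeds)

-- ===== LEMMAS AND PROOFS =====

-- common characterisation: the grouping of a list of times
def groups : List Int → List Int
  | [] => []
  | t :: rest =>
    ((1 + aInner rest t : Nat) : Int) :: groups (rest.drop (aInner rest t))
termination_by ts => ts.length
decreasing_by simp [List.length_drop]

theorem groups_nil : groups [] = [] := by
  conv_lhs => unfold groups

theorem groups_cons (t : Int) (rest : List Int) :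
    groups (t :: rest) =
      ((1 + aInner rest t : Nat) : Int) :: groups (rest.drop (aInner rest t)) := by
  conv_lhs => unfold groups

theorem aInner_le (ts : List Int) (cur : Int) : aInner ts cur ≤ ts.length := by
  induction ts with
  | nil => simp [aInner]
  | cons t rest ih => simp only [aInner, List.length_cons]; split <;> omega

-- ===== A-side: aLoop computes 'groups' =====
theorem aLoop_eq : ∀ (n : Nat) (times : List Int) (idx : Nat), times.length - idx ≤ n →
    ∀ acc, aLoop times idx acc = acc ++ groups (times.drop idx) := by
  intro n
  induction n with
  | zero =>
    intro times idx h acc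
    have hge : times.length ≤ idx := by omega
    rw [aLoop]
    simp [Nat.not_lt_of_le hge, List.drop_eq_nil_of_le hge, groups_nil]
  | succ n ih =>
    intro times idx h acc
    by_cases hlt : idx < times.length
    · rw [aLoop]
      simp only [dif_pos hlt]
      have hk := aInner_le (times.drop (idx + 1)) times[idx]
      rw [ih times (idx + (1 + aInner (times.drop (idx + 1)) times[idx]))
          (by simp at hk ⊢; omega)]
      have hdrop : times.drop idx = times[idx] :: times.drop (idx + 1) :=
        List.drop_eq_getElem_cons hlt
      rw [hdrop, groups_cons, List.drop_drop]
      have heq : aInner (times.drop (idx + 1)) times[idx] + (idx + 1)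
           = idx + (1 + aInner (times.drop (idx + 1)) times[idx]) := by omega
      simp
      have h3 : idx + (1 + aInner (times.drop (idx + 1)) times[idx])
              = idx + 1 + aInner (times.drop (idx + 1)) times[idx] := by omega
      rw [h3]
    · rw [aLoop]
      have hge : times.length ≤ idx := by omega
      simp [hlt, List.drop_eq_nil_of_le hge, groups_nil]

theorem solution_eq_groups (p s : List Int) :
    solution p s = groups ((p.zip s).map (fun xs => pvCeil (100 - xs.1) xs.2)) := by
  unfold solution
  rw [aLoop_eq ((p.zip s).map (fun xs => pvCeil (100 - xs.1) xs.2)).length _ 0 (by omega)]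
  simp

-- ===== B-side =====
-- functional prefix-maximum: pmax o ts where o is the max so far (none at the start)
def pmax : Option Int → List Int → List Int
  | _, [] => []
  | none, t :: rest => t :: pmax (some t) rest
  | some m, t :: rest =>
    let m' := if m < t then t else m
    m' :: pmax (some m') rest

theorem bMaxes_eq (ts : List Int) : ∀ acc, bMaxes acc ts = acc ++ pmax acc.getLast? ts := by
  induction ts with
  | nil => intro acc; simp [bMaxes, pmax]
  | cons t rest ih =>
    intro acc
    rw [bMaxes, ih]
    cases hl : acc.getLast? with
    | none =>
      have : acc = [] := List.getLast?_eq_none_iff.mp hl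
      subst this; simp [pmax]
    | some m =>
      simp [pmax]

-- a group of ≤-cur elements keeps the prefix max at cur
theorem pmax_replicate (rest : List Int) (t : Int) :
    pmax (some t) rest
      = List.replicate (aInner rest t) t ++ pmax (some t) (rest.drop (aInner rest t)) := by
  induction rest with
  | nil => simp [aInner]
  | cons u r ih =>
    by_cases h : u ≤ t
    · have hnt : ¬ t < u := by omega
      simp only [aInner, if_pos h, pmax, if_neg hnt]
      rw [List.replicate_add, Nat.add_comm 1 (aInner r t), List.drop_succ_cons]
      simp [ih]
    · simp [aInner, if_neg h]

-- the first element after a group (if any) exceeds the group leader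
theorem aInner_drop_head (rest : List Int) (t : Int) :
    ∀ u r', rest.drop (aInner rest t) = u :: r' → t < u := by
  induction rest with
  | nil => intro u r' h; simp at h
  | cons v r ih =>
    intro u r' h
    by_cases hv : v ≤ t
    · simp only [aInner, if_pos hv, Nat.add_comm 1 (aInner r t), List.drop_succ_cons] at h
      exact ih u r' h
    · simp only [aInner, if_neg hv, List.drop_zero] at h
      cases h; omega

-- every running maximum is at least the seed
theorem pmax_ge (L : List Int) : ∀ m x, x ∈ pmax (some m) L → m ≤ x := by
  induction L with
  | nil => intro m x h; simp [pmax] at h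
  | cons t rest ih =>
    intro m x h
    simp only [pmax, List.mem_cons] at h
    rcases h with h | h
    · subst h; split <;> omega
    · have := ih (if m < t then t else m) x h
      split at this <;> omega

-- the prefix-max list of t :: rest is (1 + k) copies of t, then the suffix's own prefix-max list
theorem pmax_decomp (t : Int) (rest : List Int) :
    pmax none (t :: rest)
      = List.replicate (1 + aInner rest t) t
          ++ pmax none (rest.drop (aInner rest t)) := by
  rw [List.replicate_add]
  simp only [List.replicate_one, pmax]
  rw [pmax_replicate rest t]
  cases hd : rest.drop (aInner rest t) with
  | nil => simp [pmax]
  | cons u r' =>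
    have ht : t < u := aInner_drop_head rest t u r' hd
    simp [pmax, if_pos ht]

-- elements of the suffix prefix-max list all exceed t
theorem pmax_suffix_gt (t : Int) (rest : List Int) :
    ∀ x ∈ pmax none (rest.drop (aInner rest t)), t < x := by
  intro x hx
  cases hd : rest.drop (aInner rest t) with
  | nil => rw [hd] at hx; simp [pmax] at hx
  | cons u r' =>
    have ht : t < u := aInner_drop_head rest t u r' hd
    rw [hd] at hx
    simp only [pmax, List.mem_cons] at hx
    rcases hx with hx | hx
    · omega
    · have := pmax_ge r' u x hx; omega

-- the value list of the counting dict over M, as a pure list function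
def vals (M : List Int) : List Int :=
  (PySem.Set.ofList M).map (fun x => (M.count x : Int))

theorem counter_values (M : List Int) :
    (M.foldl (fun d m => d.insert m (d.getD m 0 + 1)) PySem.Dict.empty).values = vals M := by
  rw [PySem.Dict.foldl_insert_getD_add_one_eq_counter]
  simp only [PySem.Dict.values, PySem.Dict.items_counter, vals, List.map_map]
  rfl

theorem ofList_replicate_succ (k : Nat) (t : Int) :
    PySem.Set.ofList (List.replicate (k + 1) t) = [t] := by
  induction k with
  | zero => rfl
  | succ k ih =>
    rw [List.replicate_succ, PySem.Set.ofList_cons, ih]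
    simp [PySem.Set.discard]

-- splitting the distinct-values list of c+1 copies of t followed by a t-free list
theorem ofList_split (c : Nat) (t : Int) (M' : List Int) (h : ∀ x ∈ M', x ≠ t) :
    PySem.Set.ofList (List.replicate (c + 1) t ++ M') = t :: PySem.Set.ofList M' := by
  rw [PySem.Set.ofList_append, ofList_replicate_succ, PySem.Set.update_eq_append_filter]
  have : (PySem.Set.ofList M').filter (fun y => !PySem.Set.contains [t] y)
       = PySem.Set.ofList M' := by
    apply List.filter_eq_self.mpr
    intro x hx
    have hxm : x ∈ M' := (PySem.Set.mem_ofList _ _).mp hx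
    have hne : x ≠ t := h x hxm
    simpa [PySem.Set.contains] using hne
  rw [this]
  rfl

theorem vals_split (c : Nat) (t : Int) (M' : List Int) (h : ∀ x ∈ M', x ≠ t) :
    vals (List.replicate (c + 1) t ++ M') = ((c + 1 : Nat) : Int) :: vals M' := by
  unfold vals
  rw [ofList_split c t M' h, List.map_cons]
  congr 1
  · rw [List.count_append, List.count_replicate_self,
        List.count_eq_zero.mpr (fun hx => (h t hx) rfl)]
  · apply List.map_congr_left
    intro x hx
    have hxm : x ∈ M' := (PySem.Set.mem_ofList _ _).mp hx
    have hne : x ≠ t := h x hxm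
    rw [List.count_append, List.count_replicate, if_neg (by simpa using Ne.symm hne)]
    simp

-- ===== B = groups, by strong induction on the times list =====
theorem vals_pmax_eq_groups : ∀ (n : Nat) (ts : List Int), ts.length ≤ n →
    vals (pmax none ts) = groups ts := by
  intro n
  induction n with
  | zero =>
    intro ts h
    have : ts = [] := List.eq_nil_of_length_eq_zero (by omega)
    subst this
    simp [pmax, vals, groups_nil, PySem.Set.ofList]
  | succ n ih =>
    intro ts h
    cases ts with
    | nil => simp [pmax, vals, groups_nil, PySem.Set.ofList]
    | cons t rest =>
      have hk := aInner_le rest t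
      rw [pmax_decomp, groups_cons]
      have hlen : (rest.drop (aInner rest t)).length ≤ n := by
        simp only [List.length_cons] at h
        simp [List.length_drop]; omega
      have hadd : 1 + aInner rest t = aInner rest t + 1 := by omega
      rw [hadd, vals_split (aInner rest t) t _
            (fun x hx => by have := pmax_suffix_gt t rest x hx; omega),
          ih _ hlen]

theorem solution_alt_eq_groups (p s : List Int) :
    solution_alt p s = groups ((p.zip s).map (fun xs => pvCeil (100 - xs.1) xs.2)) := by
  unfold solution_alt
  rw [counter_values, bMaxes_eq]
  simp only [List.getLast?_nil, List.nil_append]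
  exact vals_pmax_eq_groups _ _ (le_refl _)

-- ===== VERDICT (by name: the statement is the Claim_ definition above) =====
theorem solution_spec : Claim_equal_solution := by
  intro p s _ _
  unfold Spec_solution
  rw [solution_eq_groups, solution_alt_eq_groups]
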